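-- pv_equiv track=rewrite | github.com/alin742/pyoc2023 | 02/main.py | getMinimum
-- ===== SOURCE A (Python) =====
-- def getMinimum(sets):
--     r, g, b = 0, 0, 0
--     for st in sets:
--         cubes = st.split(", ")
--         for cube in cubes:
--             match cube.split(" "):
--                 case [n, "red"]:
--                     if int(n) > r:
--                         r = int(n)
--                 case [n, "green"]:
--                     if int(n) > g:
--                         g = int(n)
--                 case [n, "blue"]:
--                     if int(n) > b:
--                         b = int(n)
--     return r, g, b
-- ===== SOURCE B (Python) =====
-- def getMinimum(sets):
--     pairs = []
--     for st in sets: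
--         for cube in st.split(", "):
--             parts = cube.split(" ")
--             if len(parts) == 2 and parts[1] in ("red", "green", "blue"):
--                 pairs.append((int(parts[0]), parts[1]))
--     r = max([0] + [c for c, col in pairs if col == "red"])
--     g = max([0] + [c for c, col in pairs if col == "green"])
--     b = max([0] + [c for c, col in pairs if col == "blue"])
--     return r, g, b
-- ===== Notes on version B (the rewrite author's own statement) =====
-- stated objective: alternative
-- what changed: B first parses all cubes into a flat (count, color) pair list, then computes each color's answer as a separate filtered max seeded with 0, instead of A's three running maxima updated inside the nested scan.
import Mathlib
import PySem

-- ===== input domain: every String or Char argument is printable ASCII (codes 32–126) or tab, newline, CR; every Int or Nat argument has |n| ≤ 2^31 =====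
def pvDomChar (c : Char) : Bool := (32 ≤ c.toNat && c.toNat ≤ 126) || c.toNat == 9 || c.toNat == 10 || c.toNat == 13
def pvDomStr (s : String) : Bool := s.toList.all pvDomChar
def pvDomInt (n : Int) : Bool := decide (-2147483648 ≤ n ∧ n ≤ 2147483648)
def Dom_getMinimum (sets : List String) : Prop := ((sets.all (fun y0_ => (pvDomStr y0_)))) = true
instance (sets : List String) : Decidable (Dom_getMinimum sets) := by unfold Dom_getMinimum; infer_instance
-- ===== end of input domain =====

-- B parses all cubes into a flat (count, color) pair list and then takes three filtered maxima
-- seeded with 0, instead of A's running per-color maxima inside the nested scan (alternative decomposition).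


-- ===== PORT A =====
-- s.split(sep) with nonempty sep: split? is some there, exact Python semantics
def pvSplit (s sep : String) : List String := (PySem.Str.split? s sep).getD []

-- int(n) on admitted inputs always parses (Pre_); (ofStr? n).getD 0 is that value there.
def pvStepA (s : Int × Int × Int) (cube : String) : Int × Int × Int :=
  match pvSplit cube " " with
  | [n, "red"] => if (PySem.Int.ofStr? n).getD 0 > s.1 then ((PySem.Int.ofStr? n).getD 0, s.2.1, s.2.2) else s
  | [n, "green"] => if (PySem.Int.ofStr? n).getD 0 > s.2.1 then (s.1, (PySem.Int.ofStr? n).getD 0, s.2.2) else s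
  | [n, "blue"] => if (PySem.Int.ofStr? n).getD 0 > s.2.2 then (s.1, s.2.1, (PySem.Int.ofStr? n).getD 0) else s
  | _ => s

def getMinimum (sets : List String) : Int × Int × Int :=
  sets.foldl (fun s st => (pvSplit st ", ").foldl pvStepA s) (0, 0, 0)

-- ===== PORT B =====
def pvParse (cube : String) : Option (Int × String) :=
  match pvSplit cube " " with
  | [n, c] =>
      if c = "red" ∨ c = "green" ∨ c = "blue" then some ((PySem.Int.ofStr? n).getD 0, c) else none
  | _ => none

def pvBest (pairs : List (Int × String)) (color : String) : Int :=
  ((pairs.filter (fun p => p.2 == color)).map Prod.fst).foldl max 0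

def getMinimum_alt (sets : List String) : Int × Int × Int :=
  let pairs := sets.flatMap (fun st => (pvSplit st ", ").filterMap pvParse)
  (pvBest pairs "red", pvBest pairs "green", pvBest pairs "blue")

-- ===== PRECONDITION & SPEC =====
-- Pre_ excludes exactly the inputs where a cube matches "[n, color]" with an unparsable n,
-- on which both Pythons raise ValueError from int(n).
def pvOkCube (cube : String) : Bool :=
  match pvSplit cube " " with
  | [n, c] => !(c == "red" || c == "green" || c == "blue") || (PySem.Int.ofStr? n).isSome
  | _ => true

def Pre_getMinimum (sets : List String) : Prop :=
  ∀ st ∈ sets, ∀ cube ∈ pvSplit st ", ", pvOkCube cube = true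
instance (sets : List String) : Decidable (Pre_getMinimum sets) := by
  unfold Pre_getMinimum; infer_instance

def pvWitness_getMinimum : List String := ["3 red, 2 green", "1 blue"]

def Spec_getMinimum (sets : List String) (out : Int × Int × Int) : Prop := out = getMinimum_alt sets
instance (sets : List String) (out : Int × Int × Int) : Decidable (Spec_getMinimum sets out) := by unfold Spec_getMinimum; infer_instance

-- ===== CLAIM (what is proved, stated in full; the proofs are below) =====
def Claim_equal_getMinimum : Prop := ∀ (sets : List String), Dom_getMinimum sets → Pre_getMinimum sets → Spec_getMinimum sets (getMinimum sets)

-- ===== LEMMAS AND PROOFS =====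

-- B's step on an already-parsed pair: update the matching color's maximum.
def pvStep2 (s : Int × Int × Int) (p : Int × String) : Int × Int × Int :=
  if p.2 = "red" then (max s.1 p.1, s.2.1, s.2.2)
  else if p.2 = "green" then (s.1, max s.2.1 p.1, s.2.2)
  else if p.2 = "blue" then (s.1, s.2.1, max s.2.2 p.1)
  else s

theorem pvStepA_eq_parse (s : Int × Int × Int) (cube : String) :
    pvStepA s cube = match pvParse cube with
      | some p => pvStep2 s p
      | none => s := by
  obtain ⟨r, g, b⟩ := s
  unfold pvStepA pvParse pvStep2
  rcases h : pvSplit cube " " with _ | ⟨n, _ | ⟨c, rest⟩⟩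
  · simp
  · simp
  · cases rest with
    | cons _ _ => simp
    | nil =>
      by_cases hr : c = "red"
      · subst hr; simp [max_def]; split_ifs <;> simp_all <;> omega
      · by_cases hg : c = "green"
        · subst hg; simp [hr, max_def]; split_ifs <;> simp_all <;> omega
        · by_cases hb : c = "blue"
          · subst hb; simp [hr, hg, max_def]; split_ifs <;> simp_all <;> omega
          · simp [hr, hg, hb]

theorem foldl_stepA_eq (cs : List String) (s : Int × Int × Int) :
    cs.foldl pvStepA s = (cs.filterMap pvParse).foldl pvStep2 s := by
  induction cs generalizing s with
  | nil => rfl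
  | cons c cs ih =>
    simp only [List.foldl_cons, List.filterMap_cons, pvStepA_eq_parse]
    cases pvParse c with
    | none => exact ih s
    | some p => simp [ih]

theorem getMinimum_eq_foldl2 (sets : List String) :
    getMinimum sets =
      (sets.flatMap (fun st => (pvSplit st ", ").filterMap pvParse)).foldl pvStep2 (0, 0, 0) := by
  unfold getMinimum
  simp only [foldl_stepA_eq]
  induction sets using List.reverseRecOn with
  | nil => rfl
  | append_singleton sets st ih => simp [List.foldl_append, ih]

theorem foldl_step2_eq (ps : List (Int × String)) (r g b : Int) :
    ps.foldl pvStep2 (r, g, b) =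
      (((ps.filter (fun p => p.2 == "red")).map Prod.fst).foldl max r,
       ((ps.filter (fun p => p.2 == "green")).map Prod.fst).foldl max g,
       ((ps.filter (fun p => p.2 == "blue")).map Prod.fst).foldl max b) := by
  induction ps generalizing r g b with
  | nil => rfl
  | cons p ps ih =>
    obtain ⟨c, col⟩ := p
    simp only [List.foldl_cons, List.filter_cons, pvStep2]
    by_cases hr : col = "red"
    · simp [hr, ih]
    · by_cases hg : col = "green"
      · simp [hr, hg, ih]
      · by_cases hb : col = "blue"
        · simp [hr, hg, hb, ih]
        · simp [hr, hg, hb, ih]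

-- ===== VERDICT (by name: the statement is the Claim_ definition above) =====
theorem getMinimum_spec : Claim_equal_getMinimum := by
  intro sets _ _
  show getMinimum sets = getMinimum_alt sets
  rw [getMinimum_eq_foldl2, foldl_step2_eq]
  rfl
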